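-- pv_equiv track=rewrite | github.com/Kartturi/CodewarsPython | DashatizeIt.py | dashatize
-- ===== SOURCE A (Python) =====
-- def dashatize(num):
--     newList = []
--     build = ''
--
--     if num is None:
--         return 'None'
--     for i,char in enumerate(str(num),start=0):
--         if not char.isdigit():
--             continue
--         if int(char) % 2 == 0:
--             build += char
--             if i == len(str(num)) - 1:
--                 newList.append(build)
--         else:
--             if len(build) > 0:
--                 newList.append(build)
--             build = ''
--             newList.append(char)
--     return '-'.join(newList)
-- ===== SOURCE B (Python) =====
-- def dashatize(num):
--     if num is None:
--         return 'None'
--     ds = [d for d in str(num) if d.isdigit()]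
--     if not ds:
--         return ''
--     out = ds[0]
--     for a, b in zip(ds, ds[1:]):
--         if int(a) % 2 == 1 or int(b) % 2 == 1:
--             out += '-'
--         out += b
--     return out
-- ===== Notes on version B (the rewrite author's own statement) =====
-- stated objective: simpler
-- what changed: A keeps a running even-digit buffer that it flushes into a group list on each odd digit (plus a special flush at the last index) and joins with '-'; B instead makes one pass over adjacent digit pairs, inserting a dash between two digits exactly when at least one of them is odd.
import Mathlib
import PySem

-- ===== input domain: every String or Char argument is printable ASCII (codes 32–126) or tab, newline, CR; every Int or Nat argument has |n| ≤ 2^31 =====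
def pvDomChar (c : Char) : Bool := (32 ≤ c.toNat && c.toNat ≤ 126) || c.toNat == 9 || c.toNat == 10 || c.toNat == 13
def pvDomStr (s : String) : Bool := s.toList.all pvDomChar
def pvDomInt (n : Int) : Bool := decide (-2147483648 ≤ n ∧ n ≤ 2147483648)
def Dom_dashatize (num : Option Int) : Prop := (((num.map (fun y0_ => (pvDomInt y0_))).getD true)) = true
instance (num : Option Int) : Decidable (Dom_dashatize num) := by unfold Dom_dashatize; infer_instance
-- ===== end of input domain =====

-- B replaces A's flush-on-odd accumulator with a single pass over adjacent digit pairs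
-- (a dash exactly between two digits of which at least one is odd); objective: simpler.

-- ===== PORT A =====
-- one loop iteration of A (state = (newList, build) over char lists; L = len(str(num)))
def aStep (L : Int) (st : List (List Char) × List Char) (ic : Int × Char) :
    List (List Char) × List Char :=
  if !PySem.Chars.isdigit ic.2 then st
  else if PySem.Int.mod ((PySem.Int.ofChars? [ic.2]).getD 0) 2 == 0 then
    let build := st.2 ++ [ic.2]
    if ic.1 == L - 1 then (st.1 ++ [build], build) else (st.1, build)
  else
    ((if PySem.Chars.len st.2 > 0 then st.1 ++ [st.2] else st.1) ++ [[ic.2]], [])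

def dashatize (num : Option Int) : String :=
  match num with
  | none => "None"
  | some n =>
    let cs := PySem.Int.toChars n
    let r := (PySem.List.enumerate cs 0).foldl (aStep (PySem.Chars.len cs)) ([], [])
    String.ofList (PySem.Chars.join ['-'] r.1)

-- ===== PORT B =====
def digitOdd (d : Char) : Bool := PySem.Int.mod ((PySem.Int.ofChars? [d]).getD 0) 2 == 1

def bStep (out : List Char) (ab : Char × Char) : List Char :=
  (if digitOdd ab.1 || digitOdd ab.2 then out ++ ['-'] else out) ++ [ab.2]

def dashatize_alt (num : Option Int) : String :=
  match num with
  | none => "None"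
  | some n =>
    let ds := (PySem.Int.toChars n).filter (fun d => PySem.Chars.isdigit d)
    match ds with
    | [] => ""
    | d0 :: rest => String.ofList ((List.zip (d0 :: rest) rest).foldl bStep [d0])

-- ===== PRECONDITION & SPEC =====
def Spec_dashatize (num : Option Int) (out : String) : Prop := out = dashatize_alt num
instance (num : Option Int) (out : String) : Decidable (Spec_dashatize num out) := by
  unfold Spec_dashatize; infer_instance

-- ===== CLAIM (what is proved, stated in full; the proofs are below) =====
def Claim_equal_dashatize : Prop := ∀ (num : Option Int), Dom_dashatize num → Spec_dashatize num (dashatize num)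

-- ===== LEMMAS AND PROOFS =====
def DIG : List Char := ['0','1','2','3','4','5','6','7','8','9']

-- the group list A's loop produces, given the pending even run `build`
def Mgrp : List Char → List Char → List (List Char)
  | build, [] => if build = [] then [] else [build]
  | build, d :: rest =>
    if digitOdd d then (if build = [] then [] else [build]) ++ [d] :: Mgrp [] rest
    else Mgrp (build ++ [d]) rest

lemma Mgrp_nil (build : List Char) : Mgrp build [] = if build = [] then [] else [build] := rfl

lemma Mgrp_cons (build : List Char) (d : Char) (rest : List Char) :
    Mgrp build (d :: rest) =
      if digitOdd d = true then (if build = [] then [] else [build]) ++ [d] :: Mgrp [] rest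
      else Mgrp (build ++ [d]) rest := rfl

-- B's output after the leading digit, by recursion on the remaining digits
def goB : Char → List Char → List Char
  | _, [] => []
  | prev, b :: t => (if digitOdd prev || digitOdd b then ['-'] else []) ++ b :: goB b t

lemma zip_foldl (t : List Char) : ∀ (prev : Char) (out : List Char),
    (List.zip (prev :: t) t).foldl bStep out = out ++ goB prev t := by
  induction t with
  | nil => intro prev out; simp [goB]
  | cons b t ih =>
    intro prev out
    simp only [List.zip_cons_cons, List.foldl_cons, goB, bStep]
    rw [ih b]
    split_ifs <;> simp

lemma isdigit_DIG {d : Char} (h : d ∈ DIG) : PySem.Chars.isdigit d = true := by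
  simp [DIG] at h
  rcases h with h|h|h|h|h|h|h|h|h|h <;> subst h <;> decide

lemma evenA_eq {d : Char} (h : d ∈ DIG) :
    (PySem.Int.mod ((PySem.Int.ofChars? [d]).getD 0) 2 == 0) = !digitOdd d := by
  simp [DIG] at h
  rcases h with h|h|h|h|h|h|h|h|h|h <;> subst h <;> decide

lemma Mgrp_ne_nil : ∀ (ds build : List Char), build ≠ [] → Mgrp build ds ≠ [] := by
  intro ds
  induction ds with
  | nil => intro build h; simp [Mgrp, h]
  | cons d t ih =>
    intro build h
    by_cases hd : digitOdd d = true <;> simp [Mgrp, hd]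
    · exact ih (build ++ [d]) (by simp)

lemma loop_spec : ∀ (ds : List Char) (s L : Int) (nl : List (List Char)) (build : List Char),
    ds ≠ [] → (∀ c ∈ ds, c ∈ DIG) → s + ds.length = L →
    ((PySem.List.enumerate ds s).foldl (aStep L) (nl, build)).1 = nl ++ Mgrp build ds := by
  intro ds
  induction ds with
  | nil => intro _ _ _ _ h; exact absurd rfl h
  | cons d t ih =>
    intro s L nl build _ hdig hL
    have hd : d ∈ DIG := hdig d (by simp)
    rw [PySem.List.enumerate_cons, List.foldl_cons]
    have hstep : aStep L (nl, build) (s, d) =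
        if digitOdd d then
          ((if PySem.Chars.len build > 0 then nl ++ [build] else nl) ++ [[d]], ([] : List Char))
        else
          (if s == L - 1 then (nl ++ [build ++ [d]], build ++ [d]) else (nl, build ++ [d])) := by
      simp only [aStep, isdigit_DIG hd, evenA_eq hd, Bool.not_true, Bool.not_eq_true']
      by_cases h : digitOdd d = true <;> simp [h]
    cases t with
    | nil =>
      have hs : (s == L - 1) = true := by
        simp at hL; simp [beq_iff_eq]; omega
      rw [PySem.List.enumerate_nil, List.foldl_nil, hstep]
      by_cases h : digitOdd d = true <;> by_cases hb : build = [] <;>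
        simp [h, hb, hs, Mgrp_cons, Mgrp_nil, List.length_pos_iff]
    | cons e t' =>
      have hs : (s == L - 1) = false := by
        simp at hL
        simp [beq_eq_false_iff_ne]
        omega
      have hrec := fun nl' build' => ih (s + 1) L nl' build' (by simp)
        (fun c hc => hdig c (by simp [hc])) (by simp at hL ⊢; omega)
      rw [hstep]
      by_cases h : digitOdd d = true
      · simp only [if_pos h]
        rw [Mgrp_cons, if_pos h, hrec _ []]
        by_cases hb : build = [] <;> simp [hb, List.length_pos_iff]
      · simp only [if_neg h, hs, Bool.false_eq_true, if_false]
        rw [Mgrp_cons, if_neg h, hrec _ (build ++ [d])]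

lemma join_cons_ne {g : List Char} {gs : List (List Char)} (h : gs ≠ []) :
    PySem.Chars.join ['-'] (g :: gs) = g ++ '-' :: PySem.Chars.join ['-'] gs := by
  cases gs with
  | nil => exact absurd rfl h
  | cons a l => rw [PySem.Chars.join_cons_cons]; simp

-- P ∧ Q' : the join of A's groups equals B's pairwise string
lemma PQ : ∀ (t : List Char),
    (∀ (prev : Char) (build : List Char), digitOdd prev = false →
      PySem.Chars.join ['-'] (Mgrp (build ++ [prev]) t) = build ++ prev :: goB prev t) ∧
    (∀ (b : Char), digitOdd b = true →
      PySem.Chars.join ['-'] (Mgrp [] (b :: t)) = b :: goB b t) := by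
  intro t
  induction t with
  | nil =>
    constructor
    · intro prev build _
      simp [Mgrp, goB, PySem.Chars.join_singleton]
    · intro b hb
      simp [Mgrp, hb, goB, PySem.Chars.join_singleton]
  | cons x t ih =>
    obtain ⟨P, Q⟩ := ih
    constructor
    · intro prev build hprev
      by_cases hx : digitOdd x = true
      · have h1 : Mgrp (build ++ [prev]) (x :: t) = (build ++ [prev]) :: [x] :: Mgrp [] t := by
          simp [Mgrp, hx]
        have h2 : Mgrp [] (x :: t) = [x] :: Mgrp [] t := by simp [Mgrp, hx]
        rw [h1, join_cons_ne (by simp), ← h2, Q x hx]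
        simp [goB, hprev, hx]
      · have h1 : Mgrp (build ++ [prev]) (x :: t) = Mgrp ((build ++ [prev]) ++ [x]) t := by
          simp only [Bool.not_eq_true] at hx; simp [Mgrp, hx]
        rw [h1, P x (build ++ [prev]) (by simpa using hx)]
        simp [goB, hprev, hx]
    · intro b hb
      have h0 : Mgrp [] (b :: x :: t) = [b] :: Mgrp [] (x :: t) := by simp [Mgrp, hb]
      by_cases hx : digitOdd x = true
      · have h2 : Mgrp [] (x :: t) = [x] :: Mgrp [] t := by simp [Mgrp, hx]
        rw [h0, join_cons_ne (by rw [h2]; simp), Q x hx]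
        simp [goB, hb, hx]
      · have h2 : Mgrp [] (x :: t) = Mgrp [x] t := by
          simp only [Bool.not_eq_true] at hx; simp [Mgrp, hx]
        have hne : Mgrp [] (x :: t) ≠ [] := by rw [h2]; exact Mgrp_ne_nil t [x] (by simp)
        rw [h0, join_cons_ne hne, h2]
        have := P x [] (by simpa using hx)
        simp only [List.nil_append] at this
        rw [this]
        simp [goB, hb, hx]

lemma digitChar_mem {k : Nat} (h : k < 10) : Nat.digitChar k ∈ DIG := by
  interval_cases k <;> decide

lemma toDigitsCore_mem : ∀ (fuel n : Nat) (ds : List Char), (∀ c ∈ ds, c ∈ DIG) →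
    ∀ c ∈ Nat.toDigitsCore 10 fuel n ds, c ∈ DIG := by
  intro fuel
  induction fuel with
  | zero => intro n ds h; simpa [Nat.toDigitsCore] using h
  | succ f ih =>
    intro n ds h c hc
    rw [Nat.toDigitsCore] at hc
    by_cases h0 : n / 10 = 0
    · simp only [h0] at hc
      rcases List.mem_cons.mp hc with h1 | h1
      · subst h1; exact digitChar_mem (Nat.mod_lt _ (by norm_num))
      · exact h c h1
    · simp only [h0] at hc
      refine ih (n / 10) _ ?_ c hc
      intro c' hc'
      rcases List.mem_cons.mp hc' with h1 | h1
      · subst h1; exact digitChar_mem (Nat.mod_lt _ (by norm_num))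
      · exact h c' h1

lemma toDigitsCore_ne_nil : ∀ (fuel n : Nat) (ds : List Char), ds ≠ [] →
    Nat.toDigitsCore 10 fuel n ds ≠ [] := by
  intro fuel
  induction fuel with
  | zero => intro n ds h; simpa [Nat.toDigitsCore] using h
  | succ f ih =>
    intro n ds h
    rw [Nat.toDigitsCore]
    by_cases h0 : n / 10 = 0
    · simp [h0]
    · simp only [h0]
      exact ih (n / 10) _ (by simp)

lemma toDigits_mem (n : Nat) : ∀ c ∈ Nat.toDigits 10 n, c ∈ DIG :=
  toDigitsCore_mem (n + 1) n [] (by simp)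

lemma toDigits_ne_nil (n : Nat) : Nat.toDigits 10 n ≠ [] := by
  rw [Nat.toDigits, Nat.toDigitsCore]
  by_cases h0 : n / 10 = 0
  · simp [h0]
  · simp only [h0]
    exact toDigitsCore_ne_nil n (n / 10) _ (by simp)

-- for an all-digit nonempty list, A's joined groups equal B's pairwise output
lemma digits_agree (d0 : Char) (rest : List Char) (hdig : ∀ c ∈ d0 :: rest, c ∈ DIG)
    (s L : Int) (hL : s + (d0 :: rest).length = L) :
    PySem.Chars.join ['-']
        ((PySem.List.enumerate (d0 :: rest) s).foldl (aStep L) ([], [])).1 =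
      (List.zip (d0 :: rest) rest).foldl bStep [d0] := by
  rw [loop_spec (d0 :: rest) s L [] [] (by simp) hdig hL, List.nil_append, zip_foldl]
  by_cases h : digitOdd d0 = true
  · exact (PQ rest).2 d0 h
  · have := (PQ rest).1 d0 [] (by simpa using h)
    rw [Mgrp_cons, if_neg h]
    simpa using this

lemma filter_digits (ds : List Char) (hdig : ∀ c ∈ ds, c ∈ DIG) :
    ds.filter (fun d => PySem.Chars.isdigit d) = ds :=
  List.filter_eq_self.mpr (fun c hc => isdigit_DIG (hdig c hc))

lemma some_case (n : Int) : dashatize (some n) = dashatize_alt (some n) := by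
  unfold dashatize dashatize_alt
  simp only
  by_cases hn : n < 0
  · have hcs : PySem.Int.toChars n = '-' :: Nat.toDigits 10 n.natAbs := by
      simp [PySem.Int.toChars, hn]
    have hne := toDigits_ne_nil n.natAbs
    have hdig := toDigits_mem n.natAbs
    rw [hcs]
    cases hds : Nat.toDigits 10 n.natAbs with
    | nil => exact absurd hds hne
    | cons d0 rest =>
      rw [hds] at hdig
      have hfil : ('-' :: d0 :: rest).filter (fun d => PySem.Chars.isdigit d) = d0 :: rest := by
        have h1 : PySem.Chars.isdigit '-' = false := by decide
        simp [h1, filter_digits _ hdig]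
      rw [hfil]
      apply congrArg String.ofList
      rw [PySem.List.enumerate_cons, List.foldl_cons]
      have h0 : aStep (PySem.Chars.len ('-' :: d0 :: rest)) ([], []) (0, '-') = ([], []) := by
        simp [aStep, show PySem.Chars.isdigit '-' = false from by decide]
      rw [h0]
      exact digits_agree d0 rest hdig 1 _ (by simp [PySem.Chars.len]; omega)
  · have hcs : PySem.Int.toChars n = Nat.toDigits 10 n.toNat := by
      simp [PySem.Int.toChars, hn]
    have hne := toDigits_ne_nil n.toNat
    have hdig := toDigits_mem n.toNat
    rw [hcs]
    cases hds : Nat.toDigits 10 n.toNat with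
    | nil => exact absurd hds hne
    | cons d0 rest =>
      rw [hds] at hdig
      rw [filter_digits _ hdig]
      apply congrArg String.ofList
      exact digits_agree d0 rest hdig 0 _ (by simp [PySem.Chars.len])

-- ===== VERDICT (by name: the statement is the Claim_ definition above) =====
theorem dashatize_spec : Claim_equal_dashatize := by
  intro num _
  unfold Spec_dashatize
  cases num with
  | none => rfl
  | some n => exact some_case n
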